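-- pv_equiv track=rewrite | github.com/Guptarohit2003/Python-refernce-files | week3nptel.py | contracting
-- ===== SOURCE A (Python) =====
-- def contracting(l):
--     flag = False
--     for i in range(1,len(l)-1):
--         if abs(l[i-1]-l[i]) > abs(l[i]-l[i+1]):
--             flag = True
--         else:
--             flag = False
--             break
--     if flag == True:
--         return True
--     else:
--         return False
-- ===== SOURCE B (Python) =====
-- def contracting(l):
--     def ok(i):
--         return abs(l[i - 1] - l[i]) > abs(l[i] - l[i + 1])
--
--     def good(lo, hi):
--         # all positions lo <= i < hi satisfy ok(i), by divide and conquer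
--         if hi - lo <= 1:
--             return hi <= lo or ok(lo)
--         m = (lo + hi) // 2
--         return good(lo, m) and good(m, hi)
--
--     if len(l) < 3:
--         return False
--     return good(1, len(l) - 1)
-- ===== Notes on version B (the rewrite author's own statement) =====
-- stated objective: alternative
-- what changed: B checks the triple condition by divide and conquer on index intervals (recursively splitting [1, len-1) at the midpoint and conjoining the halves), instead of A's single left-to-right flag-and-break loop.
import Mathlib
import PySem

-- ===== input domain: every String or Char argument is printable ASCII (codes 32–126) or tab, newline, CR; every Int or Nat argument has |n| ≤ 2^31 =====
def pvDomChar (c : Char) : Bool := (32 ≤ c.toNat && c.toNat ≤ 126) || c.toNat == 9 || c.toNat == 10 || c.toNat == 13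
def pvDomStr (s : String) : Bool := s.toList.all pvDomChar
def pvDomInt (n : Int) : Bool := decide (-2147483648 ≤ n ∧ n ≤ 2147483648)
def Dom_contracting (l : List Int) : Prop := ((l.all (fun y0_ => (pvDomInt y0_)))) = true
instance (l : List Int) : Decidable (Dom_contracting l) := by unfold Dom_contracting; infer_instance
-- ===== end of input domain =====

-- B checks the triple condition by divide and conquer on index intervals (midpoint split,
-- conjunction of halves) instead of A's left-to-right flag-and-break loop; objective: alternative.


-- ===== PORT A =====
-- A's loop body with early break: flag is the running flag, 'false' is returned on break.
-- All indices the loop touches are in range, so pyGetD with default 0 is exact here.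
def contractingLoop (l : List Int) (idxs : List Int) (flag : Bool) : Bool :=
  match idxs with
  | [] => flag
  | i :: rest =>
    if |PySem.List.pyGetD l (i - 1) 0 - PySem.List.pyGetD l i 0| >
       |PySem.List.pyGetD l i 0 - PySem.List.pyGetD l (i + 1) 0| then
      contractingLoop l rest true
    else
      false

def contracting (l : List Int) : Bool :=
  let flag := contractingLoop l (PySem.List.pyRange 1 ((l.length : Int) - 1) 1) false
  if flag = true then true else false

-- ===== PORT B =====
-- Source B's ok(i): the triple comparison at index i (all touched indices are in range).
def condB (l : List Int) (i : Int) : Bool :=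
  decide (|PySem.List.pyGetD l (i - 1) 0 - PySem.List.pyGetD l i 0| >
          |PySem.List.pyGetD l i 0 - PySem.List.pyGetD l (i + 1) 0|)

-- Source B's good(lo, hi): every index in [lo, hi) satisfies ok, by midpoint split.
def goodB (l : List Int) (lo hi : Int) : Bool :=
  if _hle : hi - lo ≤ 1 then decide (hi ≤ lo) || condB l lo
  else
    goodB l lo (PySem.Int.floordiv (lo + hi) 2) &&
    goodB l (PySem.Int.floordiv (lo + hi) 2) hi
termination_by (hi - lo).toNat
decreasing_by
  · rw [PySem.Int.floordiv_eq_ediv_of_pos (by omega)]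
    omega
  · rw [PySem.Int.floordiv_eq_ediv_of_pos (by omega)]
    omega

def contracting_alt (l : List Int) : Bool :=
  if (l.length : Int) < 3 then false
  else goodB l 1 ((l.length : Int) - 1)

-- ===== PRECONDITION & SPEC =====
def Spec_contracting (l : List Int) (out : Bool) : Prop := out = contracting_alt l
instance (l : List Int) (out : Bool) : Decidable (Spec_contracting l out) := by unfold Spec_contracting; infer_instance

-- ===== CLAIM (what is proved, stated in full; the proofs are below) =====
def Claim_equal_contracting : Prop := ∀ (l : List Int), Dom_contracting l → Spec_contracting l (contracting l)

-- ===== LEMMAS AND PROOFS =====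

-- the per-index comparison A makes (definitionally Source B's ok as well)
def condA (l : List Int) (i : Int) : Bool :=
  decide (|PySem.List.pyGetD l (i - 1) 0 - PySem.List.pyGetD l i 0| >
          |PySem.List.pyGetD l i 0 - PySem.List.pyGetD l (i + 1) 0|)

theorem contractingLoop_eq (l : List Int) (idxs : List Int) (flag : Bool) :
    contractingLoop l idxs flag = if idxs.isEmpty then flag else idxs.all (condA l) := by
  induction idxs generalizing flag with
  | nil => simp [contractingLoop]
  | cons i rest ih =>
    simp only [contractingLoop, List.isEmpty_cons, Bool.false_eq_true, if_false, List.all_cons]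
    by_cases h : |PySem.List.pyGetD l (i - 1) 0 - PySem.List.pyGetD l i 0| >
        |PySem.List.pyGetD l i 0 - PySem.List.pyGetD l (i + 1) 0| 
    · rw [if_pos h, ih]
      cases rest <;> simp [condA, h]
    · rw [if_neg h]
      simp [condA, h]

theorem goodB_eq_all (l : List Int) (lo hi : Int) :
    goodB l lo hi = (PySem.List.pyRange lo hi 1).all (condA l) := by
  by_cases hle : hi - lo ≤ 1
  · rw [goodB, dif_pos hle]
    by_cases h0 : hi ≤ lo
    · rw [PySem.List.pyRange_one_eq_nil h0]
      simp [h0]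
    · have h1 : hi = lo + 1 := by omega
      subst h1
      rw [PySem.List.pyRange_one_singleton]
      simp [h0, condB, condA]
  · rw [goodB, dif_neg hle]
    have hm : PySem.Int.floordiv (lo + hi) 2 = (lo + hi) / 2 :=
      PySem.Int.floordiv_eq_ediv_of_pos (by omega)
    have hlo : lo ≤ (lo + hi) / 2 := by omega
    have hhi : (lo + hi) / 2 ≤ hi := by omega
    rw [hm, goodB_eq_all l lo ((lo + hi) / 2), goodB_eq_all l ((lo + hi) / 2) hi,
        PySem.List.pyRange_one_append lo ((lo + hi) / 2) hi hlo hhi, List.all_append]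
termination_by (hi - lo).toNat
decreasing_by
  · omega
  · omega

-- ===== VERDICT (by name: the statement is the Claim_ definition above) =====
theorem contracting_spec : Claim_equal_contracting := by
  intro l _
  show contracting l = contracting_alt l
  unfold contracting contracting_alt
  simp only [contractingLoop_eq]
  by_cases h3 : (l.length : Int) < 3
  · rw [PySem.List.pyRange_one_eq_nil (show (l.length : Int) - 1 ≤ 1 by omega)]
    simp [h3]
  · rw [if_neg h3]
    have hne : PySem.List.pyRange 1 ((l.length : Int) - 1) 1 ≠ [] := by
      intro h
      have hl := PySem.List.length_pyRange_one 1 ((l.length : Int) - 1)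
      rw [h] at hl
      simp at hl
      omega
    rw [List.isEmpty_eq_false_iff.mpr hne, goodB_eq_all]
    simp only [Bool.false_eq_true, if_false]
    cases (PySem.List.pyRange 1 ((l.length : Int) - 1) 1).all (condA l) <;> simp
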